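-- pv_equiv track=rewrite | github.com/ilhamabdlh/socialint-api-v2 | manual_store_simple.py | simple_topic_extraction
-- ===== SOURCE A (Python) =====
-- def simple_topic_extraction(hashtags, caption):
--     """Extract main topic from hashtags"""
--     if not hashtags:
--         return "General"
--
--     # Common automotive topics
--     automotive_topics = {
--         'design': ['design', 'styling', 'architecture', 'aesthetic'],
--         'technology': ['tech', 'innovation', 'future', 'electric', 'ev'],
--         'performance': ['performance', 'power', 'speed', 'drive'],
--         'features': ['features', 'interior', 'comfort', 'safety'],
--         'lifestyle': ['lifestyle', 'adventure', 'journey', 'travel']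
--     }
--
--     # Check hashtags for topic keywords
--     for topic, keywords in automotive_topics.items():
--         for keyword in keywords:
--             if any(keyword.lower() in tag.lower() for tag in hashtags):
--                 return topic.capitalize()
--
--     # Return first hashtag as topic if no match
--     return hashtags[0] if hashtags else "General"
-- ===== SOURCE B (Python) =====
-- # Loop-interchanged algorithm: one pass over the tags; for each tag find the
-- # index of its first matching keyword in the flat priority table, and keep the
-- # minimum such index across all tags.  The first match in A's keyword-priority
-- # order is exactly the minimum priority index over all (tag, keyword) matches,
-- # so returning the topic at the minimal index reproduces A's answer while
-- # lowercasing each tag once and stopping each tag's scan at its first hit.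
-- _TABLE = [
--     ("design", "Design"), ("styling", "Design"), ("architecture", "Design"), ("aesthetic", "Design"),
--     ("tech", "Technology"), ("innovation", "Technology"), ("future", "Technology"), ("electric", "Technology"), ("ev", "Technology"),
--     ("performance", "Performance"), ("power", "Performance"), ("speed", "Performance"), ("drive", "Performance"),
--     ("features", "Features"), ("interior", "Features"), ("comfort", "Features"), ("safety", "Features"),
--     ("lifestyle", "Lifestyle"), ("adventure", "Lifestyle"), ("journey", "Lifestyle"), ("travel", "Lifestyle"),
-- ]
--
-- def _first_kw_index(t):
--     """Index of the first table keyword occurring in t, else None."""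
--     for i, (kw, _topic) in enumerate(_TABLE):
--         if kw in t:
--             return i
--     return None
--
-- def simple_topic_extraction(hashtags, caption):
--     if not hashtags:
--         return "General"
--     best = None
--     for tag in hashtags:
--         i = _first_kw_index(tag.lower())
--         if i is not None and (best is None or i < best):
--             best = i
--     if best is not None:
--         return _TABLE[best][1]
--     return hashtags[0]
-- ===== Notes on version B (the rewrite author's own statement) =====
-- stated objective: alternative
-- what changed: Interchanges the loops: instead of A's keyword-priority scan with an any() over all tags per keyword, B makes one pass over the tags, computes each tag's first-matching-keyword index in a flat priority table, keeps the minimum index in an accumulator, and returns the topic at that index (first match in priority order = minimum priority index over all matches).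
import Mathlib
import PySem

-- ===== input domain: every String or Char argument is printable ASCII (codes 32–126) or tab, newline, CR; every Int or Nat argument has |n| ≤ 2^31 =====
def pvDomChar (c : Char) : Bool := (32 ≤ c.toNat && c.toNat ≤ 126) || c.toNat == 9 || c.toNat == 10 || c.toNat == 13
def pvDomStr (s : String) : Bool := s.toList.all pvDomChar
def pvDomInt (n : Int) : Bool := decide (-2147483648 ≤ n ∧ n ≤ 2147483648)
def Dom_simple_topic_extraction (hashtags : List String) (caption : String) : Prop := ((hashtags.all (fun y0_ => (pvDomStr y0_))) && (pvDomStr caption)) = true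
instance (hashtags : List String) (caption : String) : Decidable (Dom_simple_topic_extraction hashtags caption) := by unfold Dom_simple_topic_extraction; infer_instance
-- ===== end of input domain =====

-- B interchanges A's loops: one pass over the tags keeping the minimum
-- first-matching-keyword priority index, instead of A's per-keyword any() over all tags.

-- ===== PORT A =====
-- str.capitalize(): first char uppercased, the rest lowercased (exact on ASCII)
def pvCapitalize (s : String) : String :=
  match s.toList with
  | [] => ""
  | c :: cs => String.ofList (PySem.Chars.upperChar c :: PySem.Chars.lower cs)

-- inner loop: 'for keyword in keywords: if any(...): return topic.capitalize()'
def pvKwLoopA (topic : String) (keywords : List String) (hashtags : List String) : Option String :=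
  match keywords with
  | [] => none
  | kw :: rest =>
    if hashtags.any (fun tag => PySem.Str.isIn (PySem.Str.lower kw) (PySem.Str.lower tag)) then
      some (pvCapitalize topic)
    else pvKwLoopA topic rest hashtags

-- outer loop: 'for topic, keywords in automotive_topics.items():'
def pvTopicLoopA (items : List (String × List String)) (hashtags : List String) : Option String :=
  match items with
  | [] => none
  | (topic, keywords) :: rest =>
    match pvKwLoopA topic keywords hashtags with
    | some r => some r
    | none => pvTopicLoopA rest hashtags

def simple_topic_extraction (hashtags : List String) (caption : String) : String :=
  if hashtags = [] then "General"
  else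
    let automotive_topics : PySem.Dict String (List String) := PySem.Dict.mk
      [("design", ["design", "styling", "architecture", "aesthetic"]),
       ("technology", ["tech", "innovation", "future", "electric", "ev"]),
       ("performance", ["performance", "power", "speed", "drive"]),
       ("features", ["features", "interior", "comfort", "safety"]),
       ("lifestyle", ["lifestyle", "adventure", "journey", "travel"])]
    match pvTopicLoopA automotive_topics.items hashtags with
    | some r => r
    | none => hashtags.headD "General"   -- 'hashtags[0] if hashtags else "General"'

-- ===== PORT B =====
def pvKeywordTopics : List (String × String) :=
  [("design", "Design"), ("styling", "Design"), ("architecture", "Design"), ("aesthetic", "Design"),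
   ("tech", "Technology"), ("innovation", "Technology"), ("future", "Technology"), ("electric", "Technology"), ("ev", "Technology"),
   ("performance", "Performance"), ("power", "Performance"), ("speed", "Performance"), ("drive", "Performance"),
   ("features", "Features"), ("interior", "Features"), ("comfort", "Features"), ("safety", "Features"),
   ("lifestyle", "Lifestyle"), ("adventure", "Lifestyle"), ("journey", "Lifestyle"), ("travel", "Lifestyle")]

-- '_first_kw_index(t)': first table index whose keyword occurs in t
def pvFirstKwIdx (t : String) : Option Nat :=
  pvKeywordTopics.findIdx? (fun p => PySem.Str.isIn p.1 t)

-- 'if i is not None and (best is None or i < best): best = i'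
def pvBestStep (best : Option Nat) (i : Option Nat) : Option Nat :=
  match i, best with
  | some i, some b => if i < b then some i else some b
  | some i, none => some i
  | none, b => b

def simple_topic_extraction_alt (hashtags : List String) (caption : String) : String :=
  if hashtags = [] then "General"
  else
    let best := hashtags.foldl (fun best tag => pvBestStep best (pvFirstKwIdx (PySem.Str.lower tag))) none
    match best with
    | some b => (pvKeywordTopics.getD b ("", "")).2   -- '_TABLE[best][1]' (best is a valid index)
    | none => hashtags.headD "General"   -- 'return hashtags[0]' (nonempty in this branch)

-- ===== PRECONDITION & SPEC =====
def Spec_simple_topic_extraction (hashtags : List String) (caption : String) (out : String) : Prop := out = simple_topic_extraction_alt hashtags caption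
instance (hashtags : List String) (caption : String) (out : String) : Decidable (Spec_simple_topic_extraction hashtags caption out) := by unfold Spec_simple_topic_extraction; infer_instance

-- ===== CLAIM (what is proved, stated in full; the proofs are below) =====
def Claim_equal_simple_topic_extraction : Prop := ∀ (hashtags : List String) (caption : String), Dom_simple_topic_extraction hashtags caption → Spec_simple_topic_extraction hashtags caption (simple_topic_extraction hashtags caption)

-- ===== LEMMAS AND PROOFS =====

-- A's inner keyword loop is find? over the keywords (keywords are already lowercase)
lemma pvKwLoopA_eq (topic : String) (kws : List String) (hashtags : List String)
    (hall : ∀ kw ∈ kws, PySem.Str.lower kw = kw) :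
    pvKwLoopA topic kws hashtags =
      (kws.find? (fun kw =>
          hashtags.any (fun tag => PySem.Str.isIn kw (PySem.Str.lower tag)))).map
        (fun _ => pvCapitalize topic) := by
  induction kws with
  | nil => rfl
  | cons kw rest ih =>
    have hlow := hall kw (by simp)
    rw [pvKwLoopA, hlow, List.find?_cons]
    cases hkw : hashtags.any (fun tag => PySem.Str.isIn kw (PySem.Str.lower tag)) with
    | true => simp
    | false => simpa using ih (fun k hk => hall k (by simp [hk]))

-- A's outer loop is find? over the flattened (keyword, capitalized topic) table
lemma pvTopicLoopA_eq (items : List (String × List String)) (hashtags : List String)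
    (hall : ∀ p ∈ items, ∀ kw ∈ p.2, PySem.Str.lower kw = kw) :
    pvTopicLoopA items hashtags =
      ((items.flatMap (fun p => p.2.map (fun kw => (kw, pvCapitalize p.1)))).find?
          (fun q => hashtags.any (fun tag => PySem.Str.isIn q.1 (PySem.Str.lower tag)))).map
        Prod.snd := by
  induction items with
  | nil => rfl
  | cons p rest ih =>
    obtain ⟨topic, kws⟩ := p
    rw [pvTopicLoopA, List.flatMap_cons, List.find?_append,
        pvKwLoopA_eq topic kws hashtags (hall (topic, kws) (by simp)), List.find?_map]
    simp only [Function.comp_def]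
    rw [ih (fun q hq => hall q (by simp [hq]))]
    cases h : kws.find? (fun kw =>
        hashtags.any (fun tag => PySem.Str.isIn kw (PySem.Str.lower tag))) with
    | none => simp
    | some kw => simp

-- pvBestStep keeps an established minimum of 0
lemma pvBestStep_zero (i : Option Nat) : pvBestStep (some 0) i = some 0 := by
  cases i <;> simp [pvBestStep]

lemma foldl_best_zero {β : Type} (hs : List β) (g : β → Option Nat) :
    hs.foldl (fun b t => pvBestStep b (g t)) (some 0) = some 0 := by
  induction hs with
  | nil => rfl
  | cons t hs ih => simpa [List.foldl_cons, pvBestStep_zero] using ih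

-- merging a new minimum of 0 yields 0 from any state
lemma pvBestStep_to_zero (b : Option Nat) : pvBestStep b (some 0) = some 0 := by
  cases b with
  | none => rfl
  | some b =>
    simp only [pvBestStep]
    split
    · rfl
    · simp only [Option.some.injEq]; omega

-- if some tag attains index 0, the whole fold is 0
lemma foldl_best_exists_zero {β : Type} (hs : List β) (g : β → Option Nat) (t0 : β)
    (ht0 : t0 ∈ hs) (h0 : g t0 = some 0) (init : Option Nat) :
    hs.foldl (fun b t => pvBestStep b (g t)) init = some 0 := by
  induction hs generalizing init with
  | nil => cases ht0
  | cons t hs ih =>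
    rw [List.foldl_cons]
    rcases List.mem_cons.mp ht0 with rfl | hmem
    · rw [h0, pvBestStep_to_zero]; exact foldl_best_zero hs g
    · exact ih hmem _

-- pvBestStep commutes with shifting every index by one
lemma pvBestStep_map_succ (b i : Option Nat) :
    pvBestStep (b.map (· + 1)) (i.map (· + 1)) = (pvBestStep b i).map (· + 1) := by
  cases i with
  | none => cases b <;> rfl
  | some i =>
    cases b with
    | none => rfl
    | some b =>
      simp only [Option.map_some, pvBestStep]
      split <;> split <;> simp <;> omega

lemma foldl_best_map_succ {β : Type} (hs : List β) (g : β → Option Nat) (init : Option Nat) :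
    hs.foldl (fun b t => pvBestStep b ((g t).map (· + 1))) (init.map (· + 1)) =
      (hs.foldl (fun b t => pvBestStep b (g t)) init).map (· + 1) := by
  induction hs generalizing init with
  | nil => rfl
  | cons t hs ih => rw [List.foldl_cons, List.foldl_cons, pvBestStep_map_succ, ih]

-- KEY: the minimum over tags of each tag's first-matching index is the first index
-- matched by any tag — the loop interchange is sound.
lemma foldl_best_eq_findIdx? {α β : Type} (L : List α) (hs : List β) (f : α → β → Bool) :
    hs.foldl (fun b t => pvBestStep b (L.findIdx? (fun a => f a t))) none =
      L.findIdx? (fun a => hs.any (fun t => f a t)) := by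
  induction L generalizing hs with
  | nil =>
    simp only [List.findIdx?_nil]
    induction hs with
    | nil => rfl
    | cons t hs ih => simp only [List.foldl_cons, pvBestStep]; exact ih
  | cons a L ihL =>
    by_cases hmatch : ∃ t ∈ hs, f a t = true
    · obtain ⟨t0, ht0, hf0⟩ := hmatch
      have hrhs : (a :: L).findIdx? (fun x => hs.any (fun t => f x t)) = some 0 := by
        have : hs.any (fun t => f a t) = true := List.any_eq_true.mpr ⟨t0, ht0, hf0⟩
        simp [List.findIdx?_cons, this]
      rw [hrhs]
      exact foldl_best_exists_zero hs _ t0 ht0 (by simp [List.findIdx?_cons, hf0]) none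
    · have hfalse : ∀ t ∈ hs, f a t = false := by
        intro t ht
        exact Bool.eq_false_iff.mpr (fun hf => hmatch ⟨t, ht, hf⟩)
      have hrhs : (a :: L).findIdx? (fun x => hs.any (fun t => f x t)) =
          (L.findIdx? (fun x => hs.any (fun t => f x t))).map (· + 1) := by
        have : hs.any (fun t => f a t) = false := List.any_eq_false.mpr
          (fun t ht => by simp [hfalse t ht])
        simp [List.findIdx?_cons, this]
      rw [hrhs]
      calc hs.foldl (fun b t => pvBestStep b ((a :: L).findIdx? (fun x => f x t))) none
          = hs.foldl (fun b t => pvBestStep b ((L.findIdx? (fun x => f x t)).map (· + 1)))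
              ((none : Option Nat).map (· + 1)) := by
            apply PySem.List.foldl_congr_mem
            intro b t ht
            rw [show (a :: L).findIdx? (fun x => f x t) =
                (L.findIdx? (fun x => f x t)).map (· + 1) from by
              simp [List.findIdx?_cons, hfalse t ht]]
        _ = (hs.foldl (fun b t => pvBestStep b (L.findIdx? (fun x => f x t))) none).map (· + 1) :=
            foldl_best_map_succ hs _ none
        _ = (L.findIdx? (fun a => hs.any (fun t => f a t))).map (· + 1) := by rw [ihL hs]

-- find? of a list equals getD at the findIdx? index
lemma find?_eq_getD_findIdx? (L : List α) (p : α → Bool) (d : α) :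
    L.find? p = (L.findIdx? p).map (fun i => L.getD i d) := by
  induction L with
  | nil => rfl
  | cons a L ih =>
    rw [List.find?_cons, List.findIdx?_cons]
    cases hp : p a with
    | true => simp
    | false =>
      rw [ih]
      cases L.findIdx? p <;> simp

-- every keyword in A's dict is already lowercase
lemma pvDictLower : ∀ p ∈ (PySem.Dict.mk
      [("design", ["design", "styling", "architecture", "aesthetic"]),
       ("technology", ["tech", "innovation", "future", "electric", "ev"]),
       ("performance", ["performance", "power", "speed", "drive"]),
       ("features", ["features", "interior", "comfort", "safety"]),
       ("lifestyle", ["lifestyle", "adventure", "journey", "travel"])] :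
        PySem.Dict String (List String)).items,
    ∀ kw ∈ p.2, PySem.Str.lower kw = kw := by decide

-- ===== VERDICT (by name: the statement is the Claim_ definition above) =====
set_option maxHeartbeats 1000000 in
theorem simple_topic_extraction_spec : Claim_equal_simple_topic_extraction := by
  intro hashtags caption _
  unfold Spec_simple_topic_extraction simple_topic_extraction simple_topic_extraction_alt
  by_cases hnil : hashtags = []
  · simp [hnil]
  · simp only [if_neg hnil]
    rw [pvTopicLoopA_eq _ hashtags pvDictLower]
    rw [show (((PySem.Dict.mk
      [("design", ["design", "styling", "architecture", "aesthetic"]),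
       ("technology", ["tech", "innovation", "future", "electric", "ev"]),
       ("performance", ["performance", "power", "speed", "drive"]),
       ("features", ["features", "interior", "comfort", "safety"]),
       ("lifestyle", ["lifestyle", "adventure", "journey", "travel"])]) :
        PySem.Dict String (List String)).items.flatMap
          (fun p => p.2.map (fun kw => (kw, pvCapitalize p.1)))) = pvKeywordTopics
      from by decide]
    rw [find?_eq_getD_findIdx? pvKeywordTopics _ ("", "")]
    unfold pvFirstKwIdx
    rw [foldl_best_eq_findIdx? pvKeywordTopics hashtags
        (fun p tag => PySem.Str.isIn p.1 (PySem.Str.lower tag))]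
    cases pvKeywordTopics.findIdx? (fun q =>
        hashtags.any (fun tag => PySem.Str.isIn q.1 (PySem.Str.lower tag))) <;> simp
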